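-- pv_equiv track=rewrite | github.com/EmmmmDeee/ReconRadar | unve1ler.py | categorize_platforms
-- ===== SOURCE A (Python) =====
-- def categorize_platforms(platforms):
--     """
--     Categorize platforms into groups based on type.
--
--     Args:
--         platforms (dict): Dictionary of platforms and URLs
--
--     Returns:
--         dict: Dictionary of platform categories
--     """
--     categories = {
--         'Social Media': ['Instagram', 'Twitter', 'Facebook', 'LinkedIn', 'Pinterest', 'TikTok', 'Snapchat', 'Reddit'],
--         'Professional': ['LinkedIn', 'GitHub', 'Gitlab', 'AngelList', 'Behance', 'Dribbble', 'Freelancer', 'Fiverr', 'Dev.to', 'Replit', 'CodePen'],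
--         'Content Creation': ['YouTube', 'Twitch', 'Medium', 'Blogger', 'WordPress', 'Tumblr', 'Blogspot', 'Vimeo', 'SoundCloud'],
--         'Shopping': ['Etsy', 'Ebay', 'Amazon'],
--         'Gaming': ['Steam', 'Twitch', 'Discord'],
--         'Arts & Entertainment': ['DeviantArt', 'Flickr', 'Giphy', '500px', 'Dribbble', 'Behance', 'Letterboxd', 'IMDb'],
--         'Other': []
--     }
--
--     # Create a reverse lookup to categorize all platforms
--     platform_categories = {}
--     for platform in platforms.keys():
--         categorized = False
--         for category, platform_list in categories.items():
--             if platform in platform_list: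
--                 platform_categories[platform] = category
--                 categorized = True
--                 break
--
--         if not categorized:
--             platform_categories[platform] = 'Other'
--
--     return platform_categories
-- ===== SOURCE B (Python) =====
-- def categorize_platforms(platforms):
--     """
--     Categorize platforms into groups based on type.
--
--     Args:
--         platforms (dict): Dictionary of platforms and URLs
--
--     Returns:
--         dict: Dictionary of platform categories
--     """
--     categories = {
--         'Social Media': ['Instagram', 'Twitter', 'Facebook', 'LinkedIn', 'Pinterest', 'TikTok', 'Snapchat', 'Reddit'],
--         'Professional': ['LinkedIn', 'GitHub', 'Gitlab', 'AngelList', 'Behance', 'Dribbble', 'Freelancer', 'Fiverr', 'Dev.to', 'Replit', 'CodePen'],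
--         'Content Creation': ['YouTube', 'Twitch', 'Medium', 'Blogger', 'WordPress', 'Tumblr', 'Blogspot', 'Vimeo', 'SoundCloud'],
--         'Shopping': ['Etsy', 'Ebay', 'Amazon'],
--         'Gaming': ['Steam', 'Twitch', 'Discord'],
--         'Arts & Entertainment': ['DeviantArt', 'Flickr', 'Giphy', '500px', 'Dribbble', 'Behance', 'Letterboxd', 'IMDb'],
--         'Other': []
--     }
--
--     # Build a reverse index once: platform name -> first category that lists it.
--     reverse = {}
--     for category, platform_list in categories.items():
--         for name in platform_list:
--             if name not in reverse:
--                 reverse[name] = category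
--
--     return {platform: reverse.get(platform, 'Other') for platform in platforms}
-- ===== Notes on version B (the rewrite author's own statement) =====
-- stated objective: idiomatic
-- what changed: B precomputes a reverse lookup table (platform name -> first category) in one pass over the category lists, then maps each input platform through a single dict.get with 'Other' as default, replacing A's per-platform rescan of every category list with a flag-and-break inner loop.
import Mathlib
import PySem

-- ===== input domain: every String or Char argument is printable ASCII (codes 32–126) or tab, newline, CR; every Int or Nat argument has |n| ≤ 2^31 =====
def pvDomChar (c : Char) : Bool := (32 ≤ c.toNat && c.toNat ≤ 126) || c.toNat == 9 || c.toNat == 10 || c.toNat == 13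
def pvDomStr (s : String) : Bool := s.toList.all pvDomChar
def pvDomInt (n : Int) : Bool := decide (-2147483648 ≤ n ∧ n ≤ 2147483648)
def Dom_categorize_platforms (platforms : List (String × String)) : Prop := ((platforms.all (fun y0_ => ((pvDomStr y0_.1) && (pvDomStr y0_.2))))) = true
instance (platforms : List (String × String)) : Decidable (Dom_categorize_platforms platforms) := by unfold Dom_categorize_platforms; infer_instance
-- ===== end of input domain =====

-- B replaces A's per-platform scan of the category lists (flag + break) by a reverse
-- lookup table built once, then a single dict.get per platform (objective: idiomatic).

-- the literal `categories` dict both Pythons define (insertion order preserved)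
def pvCategories : List (String × List String) :=
  [("Social Media", ["Instagram", "Twitter", "Facebook", "LinkedIn", "Pinterest", "TikTok", "Snapchat", "Reddit"]),
   ("Professional", ["LinkedIn", "GitHub", "Gitlab", "AngelList", "Behance", "Dribbble", "Freelancer", "Fiverr", "Dev.to", "Replit", "CodePen"]),
   ("Content Creation", ["YouTube", "Twitch", "Medium", "Blogger", "WordPress", "Tumblr", "Blogspot", "Vimeo", "SoundCloud"]),
   ("Shopping", ["Etsy", "Ebay", "Amazon"]),
   ("Gaming", ["Steam", "Twitch", "Discord"]),
   ("Arts & Entertainment", ["DeviantArt", "Flickr", "Giphy", "500px", "Dribbble", "Behance", "Letterboxd", "IMDb"]),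
   ("Other", [])]

-- ===== PORT A =====
-- A's inner `for category, platform_list … if platform in platform_list: …; break`
-- with the `categorized` flag: none ↔ the flag stayed False
def pvFindCat (platform : String) : List (String × List String) → Option String
  | [] => none
  | (cat, lst) :: rest => if platform ∈ lst then some cat else pvFindCat platform rest

def categorize_platforms (platforms : List (String × String)) : List (String × String) :=
  ((PySem.Dict.ofList platforms).keys.foldl
    (fun acc platform =>
      match pvFindCat platform pvCategories with
      | some cat => acc.insert platform cat
      | none => acc.insert platform "Other")
    (PySem.Dict.empty : PySem.Dict String String)).items

-- ===== PORT B =====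
-- reverse index: platform name -> first category listing it
def pvReverse : PySem.Dict String String :=
  pvCategories.foldl
    (fun r p => p.2.foldl (fun r name => if r.contains name then r else r.insert name p.1) r)
    PySem.Dict.empty

def categorize_platforms_alt (platforms : List (String × String)) : List (String × String) :=
  ((PySem.Dict.ofList platforms).keys.foldl
    (fun acc platform => acc.insert platform (pvReverse.getD platform "Other"))
    (PySem.Dict.empty : PySem.Dict String String)).items

-- ===== PRECONDITION & SPEC =====
def Spec_categorize_platforms (platforms : List (String × String)) (out : List (String × String)) : Prop := out = categorize_platforms_alt platforms
instance (platforms : List (String × String)) (out : List (String × String)) : Decidable (Spec_categorize_platforms platforms out) := by unfold Spec_categorize_platforms; infer_instance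

-- ===== CLAIM (what is proved, stated in full; the proofs are below) =====
def Claim_equal_categorize_platforms : Prop := ∀ (platforms : List (String × String)), Dom_categorize_platforms platforms → Spec_categorize_platforms platforms (categorize_platforms platforms)

-- ===== LEMMAS AND PROOFS =====

-- every platform name occurring in a category list
def pvAllNames : List String := pvCategories.flatMap Prod.snd

theorem pvFindCat_none (p : String) :
    ∀ cats : List (String × List String), (∀ c ∈ cats, p ∉ c.2) → pvFindCat p cats = none := by
  intro cats
  induction cats with
  | nil => intro _; rfl
  | cons c rest ih =>
      intro h
      obtain ⟨cat, lst⟩ := c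
      have hnp : p ∉ lst := h _ (List.mem_cons_self ..)
      simp only [pvFindCat, if_neg hnp]
      exact ih fun c hc => h c (List.mem_cons_of_mem _ hc)

-- the per-key values of the two programs agree
set_option maxRecDepth 8192 in
theorem pvKey (p : String) :
    (match pvFindCat p pvCategories with | some cat => cat | none => "Other")
      = pvReverse.getD p "Other" := by
  by_cases h : p ∈ pvAllNames
  · exact (by decide :
      ∀ q ∈ pvAllNames,
        (match pvFindCat q pvCategories with | some cat => cat | none => "Other")
          = pvReverse.getD q "Other") p h
  · have h1 : pvFindCat p pvCategories = none := by
      refine pvFindCat_none p _ fun c hc hmem => h ?_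
      exact List.mem_flatMap.mpr ⟨c, hc, hmem⟩
    have hc : pvReverse.contains p = false := by
      by_contra hb
      have : pvReverse.contains p = true := by
        cases hx : pvReverse.contains p
        · exact absurd hx hb
        · rfl
      have hk : p ∈ pvReverse.keys := (PySem.Dict.contains_iff_mem_keys _ _).mp this
      exact h ((by decide : ∀ q ∈ pvReverse.keys, q ∈ pvAllNames) p hk)
    rw [h1, PySem.Dict.getD_of_not_contains _ _ hc]

-- ===== VERDICT (by name: the statement is the Claim_ definition above) =====
theorem categorize_platforms_spec : Claim_equal_categorize_platforms := by
  intro platforms _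
  unfold Spec_categorize_platforms categorize_platforms categorize_platforms_alt
  congr 1
  apply PySem.List.foldl_congr_mem
  intro acc x _
  rw [← pvKey x]
  cases pvFindCat x pvCategories <;> rfl
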